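-- pv_equiv track=rewrite | github.com/alexmakassiouk/caesar | caesar.py | decrypt_by_spaces
-- ===== SOURCE A (Python) =====
-- from operator import indexOf
--
-- def offset_alphabet(alphabet, offset):
--     #If offset is greater than length of alphabet: Find the offset modulus the length of alphabet
--     offset = offset%len(alphabet)
--     shifted_alphabet = alphabet[offset:] + alphabet[:offset] #Permutates alphabet. Starts with character on index 'offset' in original alphabet and ends with character on index 'offset'-1
--     return shifted_alphabet
--
-- def encrypt(text, alphabet, offset):
--     special_chars = ['\n', ',', '.', '-', '_', '"', '\t', '/', '!', '?', '$', ':', ';', "'", '#', '%', '&', '(', ')', '=', '@', '*', '–']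
--     encryption_alphabet = offset_alphabet(alphabet, offset)
--     encrypted_text = ""
--     for char in text:
--         if char.isdigit():
--             encrypted_text+=str((int(char)+offset)%10)
--         elif char in special_chars:
--             encrypted_text+=char
--         elif char.isupper():
--             index = indexOf(alphabet, char.lower())
--             encrypted_text+=encryption_alphabet[index].upper()
--         else:
--             index = indexOf(alphabet, char.lower())
--             encrypted_text+=encryption_alphabet[index]
--     return encrypted_text
--
-- def decrypt_by_spaces(text, alphabet): # Finds the offset which yields most amount of spaces in shifted_text
--     spaces = [0] * len(alphabet)
--     for i in range(1, len(alphabet)):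
--         shifted_text = encrypt(text, alphabet, i)
--         for char in shifted_text:
--             if char == " ":
--                 spaces[i]+=1
--     best_offset = indexOf(spaces, max(spaces))
--     return encrypt(text, alphabet, best_offset)
-- ===== SOURCE B (Python) =====
-- def decrypt_by_spaces(text, alphabet):
--     special_chars = ['\n', ',', '.', '-', '_', '"', '\t', '/', '!', '?', '$', ':', ';', "'", '#', '%', '&', '(', ')', '=', '@', '*', '\u2013']
--     n = len(alphabet)
--     # first-occurrence index of every alphabet character, built once
--     pos = {}
--     for j, ch in enumerate(alphabet):
--         if ch not in pos:
--             pos[ch] = j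
--     # one pass over the text: frequency of each alphabet index among the
--     # characters that the cipher actually shifts through the alphabet
--     cnt = [0] * n
--     for c in text:
--         if not c.isdigit() and c not in special_chars:
--             cnt[pos[c.lower()]] += 1
--     # spaces produced by offset i, read off the frequency table
--     spaces = [0] + [sum(cnt[j] for j in range(n) if alphabet[(j + i) % n] == ' ')
--                     for i in range(1, n)]
--     best = spaces.index(max(spaces))
--     # single final encryption using the precomputed index table
--     out = []
--     for c in text:
--         if c.isdigit():
--             out.append(str((int(c) + best) % 10))
--         elif c in special_chars:
--             out.append(c)
--         elif c.isupper():
--             out.append(alphabet[(pos[c.lower()] + best) % n].upper())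
--         else:
--             out.append(alphabet[(pos[c.lower()] + best) % n])
--     return "".join(out)
-- ===== Notes on version B (the rewrite author's own statement) =====
-- stated objective: faster
-- what changed: Instead of re-encrypting the whole text once per alphabet offset (with a linear indexOf per character), B builds a first-occurrence index dict and a per-alphabet-index frequency table in one pass over the text, reads the space count of every offset off that table, and encrypts only once with the winning offset.
-- outside the precondition, e.g. on decrypt_by_spaces('x', 'ab'): A raises ValueError, B raises KeyError; on decrypt_by_spaces('12', ''): A raises ValueError, B returns '12'
import Mathlib
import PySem

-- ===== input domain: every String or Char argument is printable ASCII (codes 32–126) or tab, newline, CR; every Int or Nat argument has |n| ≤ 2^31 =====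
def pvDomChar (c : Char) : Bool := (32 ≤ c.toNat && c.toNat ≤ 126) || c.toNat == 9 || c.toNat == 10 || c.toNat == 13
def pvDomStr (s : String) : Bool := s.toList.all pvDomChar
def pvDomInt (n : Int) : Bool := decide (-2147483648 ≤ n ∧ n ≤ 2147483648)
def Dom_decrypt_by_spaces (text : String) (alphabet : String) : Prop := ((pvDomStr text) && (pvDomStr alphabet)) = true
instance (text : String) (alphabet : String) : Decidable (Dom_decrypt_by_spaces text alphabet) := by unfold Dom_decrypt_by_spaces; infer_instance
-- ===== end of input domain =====

-- B replaces A's per-offset re-encryption of the whole text by one frequency-table pass plus a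
-- per-offset table sum and a single final encryption (objective: faster, asymptotic).

-- ===== PORT A =====
def pvSpecial : List Char := ['\n', ',', '.', '-', '_', '"', '\t', '/', '!', '?', '$', ':', ';', '\'', '#', '%', '&', '(', ')', '=', '@', '*', '–']

def pvOffsetAlphabet (al : List Char) (offset : Int) : List Char :=
  let o := PySem.Int.mod offset (PySem.List.len al)
  PySem.List.slice al (some o) none ++ PySem.List.slice al none (some o)

-- char-level body of A's encrypt loop; 'int(char)' is c.toNat - 48 (exact: the branch is guarded by isdigit)
def pvEncCharA (al : List Char) (encAl : List Char) (offset : Int) (c : Char) : Option (List Char) :=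
  if PySem.Chars.isdigit c then
    some (PySem.Int.toChars (PySem.Int.mod (((c.toNat : Int) - 48) + offset) 10))
  else if c ∈ pvSpecial then some [c]
  else if PySem.Chars.isupper c then
    (PySem.List.index? al (PySem.Chars.lowerChar c)).bind fun i =>
      (PySem.List.pyGet? encAl (i : Int)).map fun d => [PySem.Chars.upperChar d]
  else
    (PySem.List.index? al (PySem.Chars.lowerChar c)).bind fun i =>
      (PySem.List.pyGet? encAl (i : Int)).map fun d => [d]

def pvEncryptA (t : List Char) (al : List Char) (offset : Int) : Option (List Char) :=
  let encAl := pvOffsetAlphabet al offset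
  t.foldl (fun acc c => acc.bind fun s => (pvEncCharA al encAl offset c).map (s ++ ·)) (some [])

def decrypt_by_spaces (text : String) (alphabet : String) : String :=
  let t := text.toList
  let al := alphabet.toList
  let spacesO : Option (List Int) :=
    (PySem.List.pyRange 1 (PySem.List.len al) 1).foldl
      (fun acc i => acc.bind fun sp => (pvEncryptA t al i).map fun st =>
        st.foldl (fun sp2 ch => if ch = ' ' then PySem.List.pySetD sp2 i (PySem.List.pyGetD sp2 i 0 + 1) else sp2) sp)
      (some (List.replicate al.length (0 : Int)))
  match spacesO with
  | none => ""
  | some sp =>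
    match PySem.List.max? sp (fun x => x) with
    | none => ""
    | some m =>
      match PySem.List.index? sp m with
      | none => ""
      | some b =>
        match pvEncryptA t al (b : Int) with
        | none => ""
        | some r => String.ofList r

-- ===== PORT B =====
-- first-occurrence index of every alphabet character ('pos' dict in Source B)
def pvPos (al : List Char) : PySem.Dict Char Nat :=
  (PySem.List.enumerate al 0).foldl
    (fun d p => if d.contains p.2 then d else d.insert p.2 p.1.toNat) PySem.Dict.empty

-- char-level body of B's final encryption loop
def pvEncCharB (al : List Char) (pos : PySem.Dict Char Nat) (off : Int) (c : Char) : Option (List Char) :=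
  if PySem.Chars.isdigit c then
    some (PySem.Int.toChars (PySem.Int.mod (((c.toNat : Int) - 48) + off) 10))
  else if c ∈ pvSpecial then some [c]
  else if PySem.Chars.isupper c then
    (pos.get? (PySem.Chars.lowerChar c)).bind fun j =>
      (PySem.List.pyGet? al (PySem.Int.mod ((j : Int) + off) (PySem.List.len al))).map fun d => [PySem.Chars.upperChar d]
  else
    (pos.get? (PySem.Chars.lowerChar c)).bind fun j =>
      (PySem.List.pyGet? al (PySem.Int.mod ((j : Int) + off) (PySem.List.len al))).map fun d => [d]

-- B's one pass over the text: frequency of each alphabet index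
def pvCnt (t : List Char) (al : List Char) (pos : PySem.Dict Char Nat) : Option (List Int) :=
  t.foldl (fun acc c => acc.bind fun cnt =>
      if PySem.Chars.isdigit c = false ∧ c ∉ pvSpecial then
        (pos.get? (PySem.Chars.lowerChar c)).map fun j => cnt.set j (cnt.getD j 0 + 1)
      else some cnt)
    (some (List.replicate al.length (0 : Int)))

-- B's per-offset space count, read off the frequency table
def pvSpacesB (al : List Char) (cnt : List Int) : List Int :=
  0 :: (PySem.List.pyRange 1 (PySem.List.len al) 1).map (fun i =>
    ((List.range al.length).map (fun (j : Nat) =>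
      if PySem.List.pyGet? al (PySem.Int.mod ((j : Int) + i) (PySem.List.len al)) = some ' '
      then cnt.getD j 0 else 0)).sum)

def decrypt_by_spaces_alt (text : String) (alphabet : String) : String :=
  let t := text.toList
  let al := alphabet.toList
  let pos := pvPos al
  match pvCnt t al pos with
  | none => ""
  | some cnt =>
    match PySem.List.max? (pvSpacesB al cnt) (fun x => x) with
    | none => ""
    | some m =>
      match PySem.List.index? (pvSpacesB al cnt) m with
      | none => ""
      | some b =>
        match t.foldl (fun acc c => acc.bind fun s => (pvEncCharB al pos (b : Int) c).map (s ++ ·)) (some []) with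
        | none => ""
        | some r => String.ofList r

-- ===== PRECONDITION & SPEC =====
-- Pre_ excludes exactly the inputs where A raises: an empty alphabet (max() of an empty list,
-- ValueError) and texts with a character that is neither a digit nor special and whose lowercase
-- form is not in the alphabet (indexOf raises ValueError; B's dict lookup raises KeyError there).
def Pre_decrypt_by_spaces (text : String) (alphabet : String) : Prop :=
  alphabet.toList ≠ [] ∧ text.toList.all (fun c =>
    PySem.Chars.isdigit c || decide (c ∈ pvSpecial)
      || decide (PySem.Chars.lowerChar c ∈ alphabet.toList)) = true
instance (text : String) (alphabet : String) : Decidable (Pre_decrypt_by_spaces text alphabet) := by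
  unfold Pre_decrypt_by_spaces; infer_instance

def pvWitness_decrypt_by_spaces : String × String := ("b a", "ab ")

def Spec_decrypt_by_spaces (text : String) (alphabet : String) (out : String) : Prop := out = decrypt_by_spaces_alt text alphabet
instance (text : String) (alphabet : String) (out : String) : Decidable (Spec_decrypt_by_spaces text alphabet out) := by unfold Spec_decrypt_by_spaces; infer_instance

-- ===== CLAIM (what is proved, stated in full; the proofs are below) =====
def Claim_equal_decrypt_by_spaces : Prop := ∀ (text : String) (alphabet : String), Dom_decrypt_by_spaces text alphabet → Pre_decrypt_by_spaces text alphabet → Spec_decrypt_by_spaces text alphabet (decrypt_by_spaces text alphabet)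

-- ===== LEMMAS AND PROOFS =====

-- the character condition of Pre_, as used below
def pvOK (al : List Char) (c : Char) : Prop :=
  PySem.Chars.isdigit c = true ∨ c ∈ pvSpecial ∨ PySem.Chars.lowerChar c ∈ al

-- pure contribution of one text character to the space count of offset i
def pvContrib (al : List Char) (i : Int) (c : Char) : Int :=
  if PySem.Chars.isdigit c = false ∧ c ∉ pvSpecial then
    (if PySem.List.pyGet? al (PySem.Int.mod ((((PySem.List.index? al (PySem.Chars.lowerChar c)).getD 0 : Nat) : Int) + i) (PySem.List.len al)) = some ' '
     then 1 else 0)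
  else 0

-- pure step of B's counting loop
def pvCstep (al : List Char) (cnt : List Int) (c : Char) : List Int :=
  if PySem.Chars.isdigit c = false ∧ c ∉ pvSpecial then
    cnt.set ((PySem.List.index? al (PySem.Chars.lowerChar c)).getD 0)
      (cnt.getD ((PySem.List.index? al (PySem.Chars.lowerChar c)).getD 0) 0 + 1)
  else cnt

-- total space count at offset i
def pvCountI (al : List Char) (t : List Char) (i : Int) : Int := (t.map (pvContrib al i)).sum

lemma pvPos_aux (al : List Char) (ch : Char) : ∀ (s : Nat) (d : PySem.Dict Char Nat),
    ((PySem.List.enumerate al (s : Int)).foldl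
      (fun d p => if d.contains p.2 then d else d.insert p.2 p.1.toNat) d).get? ch
    = if d.contains ch then d.get? ch else (PySem.List.index? al ch).map (· + s) := by
  induction al with
  | nil =>
    intro s d
    simp only [PySem.List.enumerate_nil, List.foldl_nil]
    split
    · rfl
    · rename_i h
      rw [PySem.List.index?_eq_idxOf?]
      simp only [List.idxOf?_nil, Option.map_none]
      rw [(PySem.Dict.get?_eq_none_iff_contains d ch).mpr (by simp_all)]
  | cons x xs ih =>
    intro s d
    rw [PySem.List.enumerate_cons]
    simp only [List.foldl_cons, Int.toNat_natCast]
    have hcast : ((s : Int) + 1) = ((s + 1 : Nat) : Int) := by push_cast; ring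
    by_cases hdx : d.contains x
    · rw [if_pos hdx, hcast, ih (s + 1) d]
      by_cases hch : d.contains ch
      · simp [hch]
      · rw [if_neg (by simp [hch]), if_neg (by simp [hch])]
        have hne : x ≠ ch := fun he => by subst he; simp_all
        rw [PySem.List.index?_cons_of_ne xs hne]
        cases PySem.List.index? xs ch <;> simp <;> omega
    · rw [if_neg hdx, hcast, ih (s + 1) (d.insert x s)]
      by_cases hch : ch = x
      · subst hch
        rw [if_pos (PySem.Dict.contains_insert_self d ch s), PySem.Dict.get?_insert_self,
          if_neg (by simp [hdx]), PySem.List.index?_cons_self]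
        simp
      · have hc' : (d.insert x s).contains ch = d.contains ch := by
          rw [PySem.Dict.contains_insert d x ch s]; simp [hch]
        rw [hc', PySem.Dict.get?_insert_of_ne d s hch]
        by_cases hdc : d.contains ch
        · simp [hdc]
        · rw [if_neg (by simp [hdc]), if_neg (by simp [hdc])]
          rw [PySem.List.index?_cons_of_ne xs (fun he => hch he.symm)]
          cases PySem.List.index? xs ch <;> simp <;> omega

lemma pvPos_get? (al : List Char) (ch : Char) :
    (pvPos al).get? ch = PySem.List.index? al ch := by
  unfold pvPos
  have h := pvPos_aux al ch 0 PySem.Dict.empty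
  simp only [Nat.cast_zero, PySem.Dict.contains_empty] at h
  simpa using h

lemma pvRot (al : List Char) (off : Int) (j : Nat) (hj : j < al.length) :
    PySem.List.pyGet? (pvOffsetAlphabet al off) (j : Int)
      = PySem.List.pyGet? al (PySem.Int.mod ((j : Int) + off) (PySem.List.len al)) := by
  have hn : 0 < al.length := by omega
  have hnz : (0 : Int) < (al.length : Int) := by exact_mod_cast hn
  set n : Int := (al.length : Int) with hndef
  have hlen : PySem.List.len al = n := by simp [PySem.List.len_eq, hndef]
  rw [pvOffsetAlphabet]
  simp only [hlen]
  set o := PySem.Int.mod off n with hodef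
  have ho0 : 0 ≤ o := PySem.Int.mod_nonneg off hnz
  have hon : o < n := PySem.Int.mod_lt off hnz
  have hmA : PySem.Int.mod ((j : Int) + off) n = ((j : Int) + off) % n :=
    PySem.Int.mod_eq_emod_of_pos hnz
  have hoemod : o = off % n := PySem.Int.mod_eq_emod_of_pos hnz
  have hsplit : ((j : Int) + off) % n = ((j : Int) + o) % n := by
    conv_lhs => rw [← Int.ediv_add_emod off n]
    rw [hoemod]
    rw [show (j : Int) + (n * (off / n) + off % n) = ((j : Int) + off % n) + n * (off / n) by ring]
    rw [Int.add_mul_emod_self_left]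
  have hjo2 : (j : Int) + o < 2 * n := by omega
  have hm2 : ((j : Int) + o) % n
      = if (j : Int) + o < n then (j : Int) + o else (j : Int) + o - n := by
    split
    · exact Int.emod_eq_of_lt (by omega) (by omega)
    · conv_lhs => rw [show (j : Int) + o = ((j : Int) + o - n) + n * 1 by ring,
        Int.add_mul_emod_self_left]
      exact Int.emod_eq_of_lt (by omega) (by omega)
  rw [PySem.List.slice_from al ho0, PySem.List.slice_to al ho0]
  have hoton : o.toNat < al.length := by omega
  have hdl : (al.drop o.toNat).length = al.length - o.toNat := by simp
  rw [PySem.List.pyGet?_natCast, hmA, hsplit]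
  have hmnn : 0 ≤ ((j : Int) + o) % n := by rw [hm2]; split <;> omega
  rw [PySem.List.pyGet?_of_nonneg al hmnn, hm2]
  by_cases hcase : (j : Int) + o < n
  · rw [if_pos hcase]
    have hjlt : j < (al.drop o.toNat).length := by omega
    rw [List.getElem?_append_left hjlt, List.getElem?_drop]
    congr 1
    omega
  · rw [if_neg hcase]
    have hge : (al.drop o.toNat).length ≤ j := by omega
    rw [List.getElem?_append_right hge, List.getElem?_take]
    rw [if_pos (by omega : j - (al.drop o.toNat).length < o.toNat)]
    congr 1
    omega

lemma pvEncChar_eq (al : List Char) (off : Int) (c : Char) (hc : pvOK al c) :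
    pvEncCharA al (pvOffsetAlphabet al off) off c = pvEncCharB al (pvPos al) off c := by
  unfold pvEncCharA pvEncCharB
  by_cases h1 : PySem.Chars.isdigit c
  · simp [h1]
  · by_cases h2 : c ∈ pvSpecial
    · simp [h1, h2]
    · have hmem : PySem.Chars.lowerChar c ∈ al := by
        rcases hc with h | h | h
        · exact absurd h h1
        · exact absurd h h2
        · exact h
      obtain ⟨j, hj⟩ := Option.isSome_iff_exists.mp
        ((PySem.List.index?_isSome_iff al (PySem.Chars.lowerChar c)).mpr hmem)
      obtain ⟨hjlt, -, -⟩ := PySem.List.getElem_of_index?_eq_some hj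
      rw [pvPos_get?]
      simp only [h1, Bool.false_eq_true, if_false, h2, hj, Option.bind_some]
      rw [pvRot al off j hjlt]

lemma pvEncCharA_isSome (al : List Char) (off : Int) (c : Char) (hc : pvOK al c) :
    (pvEncCharA al (pvOffsetAlphabet al off) off c).isSome := by
  unfold pvEncCharA
  by_cases h1 : PySem.Chars.isdigit c
  · simp [h1]
  · by_cases h2 : c ∈ pvSpecial
    · simp [h1, h2]
    · have hmem : PySem.Chars.lowerChar c ∈ al := by
        rcases hc with h | h | h
        · exact absurd h h1
        · exact absurd h h2
        · exact h
      obtain ⟨j, hj⟩ := Option.isSome_iff_exists.mp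
        ((PySem.List.index?_isSome_iff al (PySem.Chars.lowerChar c)).mpr hmem)
      obtain ⟨hjlt, -, -⟩ := PySem.List.getElem_of_index?_eq_some hj
      have hnz : (0 : Int) < (al.length : Int) := by
        have : 0 < al.length := by omega
        exact_mod_cast this
      have hb0 : 0 ≤ PySem.Int.mod ((j : Int) + off) (PySem.List.len al) := by
        rw [PySem.List.len_eq]; exact PySem.Int.mod_nonneg _ hnz
      have hb1 : PySem.Int.mod ((j : Int) + off) (PySem.List.len al) < (al.length : Int) := by
        rw [PySem.List.len_eq]; exact PySem.Int.mod_lt _ hnz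
      simp only [h1, Bool.false_eq_true, if_false, h2, hj, Option.bind_some]
      rw [pvRot al off j hjlt, PySem.List.pyGet?_eq_some_getElem al hb0 hb1]
      split <;> simp

lemma pvFoldBind {ι τ σ : Type} (l : List ι) (g : ι → Option τ) (dflt : τ)
    (step : σ → ι → τ → σ) (s0 : σ) (h : ∀ i ∈ l, (g i).isSome) :
    l.foldl (fun acc i => acc.bind fun s => (g i).map fun y => step s i y) (some s0)
      = some (l.foldl (fun s i => step s i ((g i).getD dflt)) s0) := by
  induction l generalizing s0 with
  | nil => rfl
  | cons x xs ih =>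
    obtain ⟨y, hy⟩ := Option.isSome_iff_exists.mp (h x (by simp))
    simp only [List.foldl_cons, Option.bind_some, hy, Option.map_some, Option.getD_some]
    exact ih _ (fun i hi => h i (by simp [hi]))

lemma pvCnt_aux (al : List Char) : ∀ (t : List Char) (cnt0 : List Int), (∀ c ∈ t, pvOK al c) →
    t.foldl (fun acc c => acc.bind fun cnt =>
      if PySem.Chars.isdigit c = false ∧ c ∉ pvSpecial then
        ((pvPos al).get? (PySem.Chars.lowerChar c)).map fun j => cnt.set j (cnt.getD j 0 + 1)
      else some cnt) (some cnt0)
    = some (t.foldl (pvCstep al) cnt0) := by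
  intro t
  induction t with
  | nil => intro cnt0 _; rfl
  | cons x xs ih =>
    intro cnt0 h
    simp only [List.foldl_cons]
    by_cases hrel : PySem.Chars.isdigit x = false ∧ x ∉ pvSpecial
    · have hmem : PySem.Chars.lowerChar x ∈ al := by
        rcases h x (by simp) with hh | hh | hh
        · exact absurd hh (by simp [hrel.1])
        · exact absurd hh hrel.2
        · exact hh
      obtain ⟨j, hj⟩ := Option.isSome_iff_exists.mp
        ((PySem.List.index?_isSome_iff al (PySem.Chars.lowerChar x)).mpr hmem)
      rw [pvPos_get?, hj]
      simp only [if_pos hrel, Option.bind_some, Option.map_some]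
      rw [show pvCstep al cnt0 x = cnt0.set j (cnt0.getD j 0 + 1) by
        unfold pvCstep; rw [if_pos hrel, hj]; rfl]
      exact ih _ (fun c hc => h c (by simp [hc]))
    · simp only [if_neg hrel, Option.bind_some]
      rw [show pvCstep al cnt0 x = cnt0 by unfold pvCstep; rw [if_neg hrel]]
      exact ih _ (fun c hc => h c (by simp [hc]))

lemma pvCnt_eq (t al : List Char) (h : ∀ c ∈ t, pvOK al c) :
    pvCnt t al (pvPos al) = some (t.foldl (pvCstep al) (List.replicate al.length 0)) := by
  unfold pvCnt
  exact pvCnt_aux al t _ h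

lemma pvUpperChar_space (d : Char) : (PySem.Chars.upperChar d = ' ') ↔ d = ' ' := by
  unfold PySem.Chars.upperChar
  split
  · rename_i h
    unfold PySem.Chars.islower at h
    simp only [Bool.and_eq_true, decide_eq_true_eq] at h
    have h1 : 97 ≤ d.toNat := by
      have := h.1; rwa [Char.le_def, UInt32.le_iff_toNat_le] at this
    have h2 : d.toNat ≤ 122 := by
      have := h.2; rwa [Char.le_def, UInt32.le_iff_toNat_le] at this
    constructor
    · intro he
      exfalso
      have hco := congrArg Char.toNat he
      rw [Char.toNat_ofNat] at hco
      have hv : Nat.isValidChar (d.toNat - 32) := by unfold Nat.isValidChar; omega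
      simp only [hv, if_pos] at hco
      have : (' ').toNat = 32 := rfl
      omega
    · intro he
      subst he
      exfalso
      have : (' ').toNat = 32 := rfl
      omega
  · exact Iff.rfl

lemma pvCount_encCharA (al : List Char) (i : Int) (c : Char) (hc : pvOK al c) :
    (((pvEncCharA al (pvOffsetAlphabet al i) i c).getD []).count ' ' : Int) = pvContrib al i c := by
  unfold pvEncCharA pvContrib
  by_cases h1 : PySem.Chars.isdigit c
  · rw [if_pos h1, if_neg (by simp [h1])]
    simp only [Option.getD_some]
    set m := PySem.Int.mod ((c.toNat : Int) - 48 + i) 10 with hm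
    have h0 : 0 ≤ m := PySem.Int.mod_nonneg _ (by norm_num)
    have h10 : m < 10 := PySem.Int.mod_lt _ (by norm_num)
    interval_cases m <;> decide
  · by_cases h2 : c ∈ pvSpecial
    · rw [if_neg h1, if_pos h2, if_neg (by simp [h2])]
      have hne : c ≠ ' ' := by
        intro he; subst he; revert h2; decide
      simp [hne]
    · have hmem : PySem.Chars.lowerChar c ∈ al := by
        rcases hc with h | h | h
        · exact absurd h h1
        · exact absurd h h2
        · exact h
      obtain ⟨j, hj⟩ := Option.isSome_iff_exists.mp
        ((PySem.List.index?_isSome_iff al (PySem.Chars.lowerChar c)).mpr hmem)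
      obtain ⟨hjlt, -, -⟩ := PySem.List.getElem_of_index?_eq_some hj
      have hnz : (0 : Int) < (al.length : Int) := by
        have : 0 < al.length := by omega
        exact_mod_cast this
      have hb0 : 0 ≤ PySem.Int.mod ((j : Int) + i) (PySem.List.len al) := by
        rw [PySem.List.len_eq]; exact PySem.Int.mod_nonneg _ hnz
      have hb1 : PySem.Int.mod ((j : Int) + i) (PySem.List.len al) < (al.length : Int) := by
        rw [PySem.List.len_eq]; exact PySem.Int.mod_lt _ hnz
      obtain ⟨d, hget⟩ := Option.isSome_iff_exists.mp (by
        rw [PySem.List.pyGet?_eq_some_getElem al hb0 hb1]; rfl :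
        (PySem.List.pyGet? al (PySem.Int.mod ((j : Int) + i) (PySem.List.len al))).isSome)
      have hrel : PySem.Chars.isdigit c = false ∧ c ∉ pvSpecial := ⟨by simp [h1], h2⟩
      rw [if_neg h1, if_neg h2, if_pos hrel, hj]
      simp only [Option.getD_some, Option.bind_some]
      rw [pvRot al i j hjlt]
      by_cases hu : PySem.Chars.isupper c
      · simp only [if_pos hu, hget, Option.map_some, Option.getD_some]
        by_cases hsp : d = ' '
        · have hupv : PySem.Chars.upperChar d = ' ' := (pvUpperChar_space d).mpr hsp
          subst hsp
          simp [hupv]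
        · have hupv : PySem.Chars.upperChar d ≠ ' ' := fun he => hsp ((pvUpperChar_space d).mp he)
          simp [hsp, hupv]
      · simp only [if_neg hu, hget, Option.map_some, Option.getD_some]
        by_cases hsp : d = ' '
        · simp [hsp]
        · simp [hsp]

lemma pvCount_flatMap (t : List Char) (g : Char → List Char) :
    ((t.flatMap g).count ' ' : Int) = (t.map (fun c => (((g c).count ' ') : Int))).sum := by
  induction t with
  | nil => simp
  | cons x xs ih => simp [List.count_append, ih]

lemma pvGetD_set (l : List Int) (j : Nat) (v : Int) (k : Nat) (h : j < l.length) :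
    (l.set j v).getD k 0 = if k = j then v else l.getD k 0 := by
  by_cases hk : k = j
  · subst hk; simp [List.getD_eq_getElem?_getD, h]
  · simp only [List.getD_eq_getElem?_getD, List.getElem?_set]
    simp [Ne.symm hk, hk]

lemma pvSumRange (n : Nat) (f : Nat → Int) :
    ∑ k ∈ Finset.range n, f k = ((List.range n).map f).sum := by
  simp only [Finset.sum, Finset.range, Multiset.range, Multiset.sum, Multiset.map_coe,
    Multiset.coe_foldr]
  rw [List.sum_eq_foldr]

lemma pvSum_set (P : Nat → Prop) [DecidablePred P] (n : Nat) (cnt : List Int) (hlen : cnt.length = n)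
    (j : Nat) (hj : j < n) (v : Int) :
    ((List.range n).map (fun k => if P k then (cnt.set j v).getD k 0 else 0)).sum
      = ((List.range n).map (fun k => if P k then cnt.getD k 0 else 0)).sum
        + (if P j then v - cnt.getD j 0 else 0) := by
  rw [← pvSumRange, ← pvSumRange]
  have hpt : ∀ k ∈ Finset.range n, (if P k then (cnt.set j v).getD k 0 else 0)
      = (if P k then cnt.getD k 0 else 0)
        + (if k = j then (if P j then v - cnt.getD j 0 else 0) else 0) := by
    intro k _
    rw [pvGetD_set cnt j v k (by omega)]
    by_cases hkj : k = j
    · subst hkj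
      by_cases hp : P k
      · simp [hp]
      · simp [hp]
    · simp [hkj]
  rw [Finset.sum_congr rfl hpt, Finset.sum_add_distrib,
    Finset.sum_ite_eq' (Finset.range n) j (fun _ => if P j then v - cnt.getD j 0 else 0)]
  simp [hj]

lemma pvSwap (al : List Char) (i : Int) : ∀ (t : List Char) (cnt0 : List Int),
    (∀ c ∈ t, pvOK al c) → cnt0.length = al.length →
    ((List.range al.length).map (fun (j : Nat) =>
      if PySem.List.pyGet? al (PySem.Int.mod ((j : Int) + i) (PySem.List.len al)) = some ' '
      then (t.foldl (pvCstep al) cnt0).getD j 0 else 0)).sum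
    = ((List.range al.length).map (fun (j : Nat) =>
      if PySem.List.pyGet? al (PySem.Int.mod ((j : Int) + i) (PySem.List.len al)) = some ' '
      then cnt0.getD j 0 else 0)).sum + pvCountI al t i := by
  intro t
  induction t with
  | nil => intro cnt0 _ _; simp [pvCountI]
  | cons x xs ih =>
    intro cnt0 h hlen
    simp only [List.foldl_cons]
    have hlen' : (pvCstep al cnt0 x).length = al.length := by
      unfold pvCstep; split <;> simp [hlen]
    rw [ih (pvCstep al cnt0 x) (fun c hc => h c (by simp [hc])) hlen']
    have hstep : ((List.range al.length).map (fun (j : Nat) =>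
        if PySem.List.pyGet? al (PySem.Int.mod ((j : Int) + i) (PySem.List.len al)) = some ' '
        then (pvCstep al cnt0 x).getD j 0 else 0)).sum
        = ((List.range al.length).map (fun (j : Nat) =>
        if PySem.List.pyGet? al (PySem.Int.mod ((j : Int) + i) (PySem.List.len al)) = some ' '
        then cnt0.getD j 0 else 0)).sum + pvContrib al i x := by
      by_cases hrel : PySem.Chars.isdigit x = false ∧ x ∉ pvSpecial
      · have hmem : PySem.Chars.lowerChar x ∈ al := by
          rcases h x (by simp) with hh | hh | hh
          · exact absurd hh (by simp [hrel.1])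
          · exact absurd hh hrel.2
          · exact hh
        obtain ⟨j, hj⟩ := Option.isSome_iff_exists.mp
          ((PySem.List.index?_isSome_iff al (PySem.Chars.lowerChar x)).mpr hmem)
        obtain ⟨hjlt, -, -⟩ := PySem.List.getElem_of_index?_eq_some hj
        rw [show pvCstep al cnt0 x
            = cnt0.set j (cnt0.getD j 0 + 1) by
          unfold pvCstep; rw [if_pos hrel, hj]; rfl]
        rw [pvSum_set (fun k => PySem.List.pyGet? al
            (PySem.Int.mod ((k : Int) + i) (PySem.List.len al)) = some ' ')
          al.length cnt0 hlen j hjlt (cnt0.getD j 0 + 1)]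
        unfold pvContrib
        rw [if_pos hrel, hj]
        simp only [Option.getD_some]
        split <;> ring
      · rw [show pvCstep al cnt0 x = cnt0 by unfold pvCstep; rw [if_neg hrel]]
        unfold pvContrib
        rw [if_neg hrel]
        ring
    rw [hstep]
    unfold pvCountI
    simp only [List.map_cons, List.sum_cons]
    ring

lemma pvInnerFold (i : Int) (h0 : 0 ≤ i) : ∀ (st : List Char) (sp : List Int),
    st.foldl (fun sp2 ch => if ch = ' ' then PySem.List.pySetD sp2 i (PySem.List.pyGetD sp2 i 0 + 1) else sp2) sp
      = PySem.List.pySetD sp i (PySem.List.pyGetD sp i 0 + (st.count ' ' : Int)) := by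
  intro st
  induction st with
  | nil =>
    intro sp
    simp only [List.foldl_nil, List.count_nil, Nat.cast_zero, add_zero]
    rw [PySem.List.pySetD_of_nonneg sp _ h0]
    by_cases hlt : i.toNat < sp.length
    · rw [PySem.List.pyGetD_eq_getElem sp 0 h0 (by omega)]
      exact (List.set_getElem_self hlt).symm
    · exact (List.set_eq_of_length_le (by omega)).symm
  | cons ch st ih =>
    intro sp
    simp only [List.foldl_cons]
    by_cases hch : ch = ' '
    · rw [if_pos hch, ih]
      subst hch
      rw [List.count_cons_self]
      by_cases hlt : i.toNat < sp.length
      · rw [PySem.List.pySetD_of_nonneg sp _ h0, PySem.List.pySetD_of_nonneg _ _ h0,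
          PySem.List.pySetD_of_nonneg sp _ h0,
          PySem.List.pyGetD_eq_getElem sp 0 h0 (by omega)]
        rw [PySem.List.pyGetD_eq_getElem _ 0 h0 (by simp; omega)]
        rw [List.set_set]
        rw [List.getElem_set_self (by simpa using hlt)]
        congr 1
        push_cast
        ring
      · have hout : ∀ (v : Int) (l : List Int), l.length = sp.length →
            PySem.List.pySetD l i v = l := by
          intro v l hl
          rw [PySem.List.pySetD_of_nonneg l _ h0]
          exact List.set_eq_of_length_le (by omega)
        rw [hout _ sp rfl, hout _ sp rfl, hout _ sp rfl]
    · rw [if_neg hch, ih, List.count_cons_of_ne hch]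

lemma pvSetFold (cfun : Int → Int) : ∀ (m : Nat) (a : Int) (sp : List Int), 0 ≤ a →
    ((sp.length : Int) - a).toNat = m →
    ((PySem.List.pyRange a (sp.length : Int) 1).foldl
        (fun sp2 i => PySem.List.pySetD sp2 i (PySem.List.pyGetD sp2 i 0 + cfun i)) sp).length = sp.length
    ∧ ∀ k : Nat, k < sp.length →
      ((PySem.List.pyRange a (sp.length : Int) 1).foldl
        (fun sp2 i => PySem.List.pySetD sp2 i (PySem.List.pyGetD sp2 i 0 + cfun i)) sp).getD k 0
      = if a ≤ (k : Int) then sp.getD k 0 + cfun k else sp.getD k 0 := by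
  intro m
  induction m with
  | zero =>
    intro a sp ha hm
    rw [PySem.List.pyRange_one_eq_nil (by omega)]
    simp only [List.foldl_nil]
    refine ⟨trivial, fun k hk => ?_⟩
    rw [if_neg (by omega)]
  | succ m ih =>
    intro a sp ha hm
    have halt : a < (sp.length : Int) := by omega
    rw [PySem.List.pyRange_one_cons halt]
    simp only [List.foldl_cons]
    have hlen' : (PySem.List.pySetD sp a (PySem.List.pyGetD sp a 0 + cfun a)).length = sp.length :=
      PySem.List.length_pySetD sp a _
    obtain ⟨ihlen, ihget⟩ := ih (a + 1) (PySem.List.pySetD sp a (PySem.List.pyGetD sp a 0 + cfun a))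
      (by omega) (by rw [hlen']; omega)
    rw [hlen'] at ihlen ihget
    refine ⟨ihlen, fun k hk => ?_⟩
    rw [ihget k hk]
    have hset : (PySem.List.pySetD sp a (PySem.List.pyGetD sp a 0 + cfun a)).getD k 0
        = if k = a.toNat then sp.getD a.toNat 0 + cfun a else sp.getD k 0 := by
      rw [PySem.List.pySetD_of_nonneg sp _ ha,
        pvGetD_set sp a.toNat _ k (by omega)]
      rw [PySem.List.pyGetD_eq_getElem sp 0 ha (by omega)]
      rw [List.getD_eq_getElem sp 0 (by omega : a.toNat < sp.length)]
    by_cases hka : k = a.toNat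
    · subst hka
      rw [if_neg (by omega), hset, if_pos rfl, if_pos (by omega)]
      congr 2
      omega
    · rw [hset, if_neg hka]
      by_cases hak : a + 1 ≤ (k : Int)
      · rw [if_pos hak, if_pos (by omega)]
      · rw [if_neg hak, if_neg (by omega)]

-- ===== VERDICT (by name: the statement is the Claim_ definition above) =====
lemma pvCstep_len (al : List Char) : ∀ (l : List Char) (cnt0 : List Int),
    (l.foldl (pvCstep al) cnt0).length = cnt0.length := by
  intro l
  induction l with
  | nil => intro cnt0; rfl
  | cons x xs ih =>
    intro cnt0
    simp only [List.foldl_cons]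
    rw [ih]
    unfold pvCstep
    split <;> simp

-- ===== VERDICT (by name: the statement is the Claim_ definition above) =====
theorem decrypt_by_spaces_spec : Claim_equal_decrypt_by_spaces := by
  intro text alphabet _hdom hpre
  unfold Spec_decrypt_by_spaces decrypt_by_spaces decrypt_by_spaces_alt
  dsimp only
  obtain ⟨hal, hallb⟩ := hpre
  set t := text.toList with ht
  set al := alphabet.toList with hal'
  have hok : ∀ c ∈ t, PySem.Chars.isdigit c = true ∨ c ∈ pvSpecial
      ∨ PySem.Chars.lowerChar c ∈ al := by
    intro c hc
    have hcb := List.all_eq_true.mp hallb c hc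
    have := by simpa [Bool.or_eq_true, decide_eq_true_eq] using hcb
    tauto
  have hn : 0 < al.length := List.length_pos_iff.mpr hal
  have hEnc : ∀ i : Int, pvEncryptA t al i
      = some (t.flatMap (fun c => (pvEncCharA al (pvOffsetAlphabet al i) i c).getD [])) := by
    intro i
    unfold pvEncryptA
    rw [pvFoldBind t (fun c => pvEncCharA al (pvOffsetAlphabet al i) i c) []
      (fun s _ y => s ++ y) [] (fun c hc => pvEncCharA_isSome al i c (hok c hc))]
    rw [PySem.List.foldl_append_eq_flatMap]
    simp
  have hcnt : ∀ i : Int,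
      ((t.flatMap (fun c => (pvEncCharA al (pvOffsetAlphabet al i) i c).getD [])).count ' ' : Int)
      = pvCountI al t i := by
    intro i
    rw [pvCount_flatMap]
    unfold pvCountI
    congr 1
    exact List.map_congr_left (fun c hc => pvCount_encCharA al i c (hok c hc))
  set cntB := t.foldl (pvCstep al) (List.replicate al.length 0) with hcntB
  have hcntlen : cntB.length = al.length := by
    rw [hcntB, pvCstep_len]; simp
  have hbase : ∀ i : Int, ((List.range al.length).map (fun (j : Nat) =>
      if PySem.List.pyGet? al (PySem.Int.mod ((j : Int) + i) (PySem.List.len al)) = some ' '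
      then (List.replicate al.length (0 : Int)).getD j 0 else 0)).sum = 0 := by
    intro i
    apply List.sum_eq_zero
    intro x hx
    obtain ⟨j, -, hval⟩ := List.mem_map.mp hx
    rw [← hval]
    split
    · simp [List.getD_eq_getElem?_getD, List.getElem?_replicate]
      split <;> rfl
    · rfl
  have hswap : ∀ i : Int, ((List.range al.length).map (fun (j : Nat) =>
      if PySem.List.pyGet? al (PySem.Int.mod ((j : Int) + i) (PySem.List.len al)) = some ' '
      then cntB.getD j 0 else 0)).sum = pvCountI al t i := by
    intro i
    rw [hcntB, pvSwap al i t (List.replicate al.length 0) hok (by simp), hbase i]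
    ring
  -- A's spaces list equals B's
  have hA : (PySem.List.pyRange 1 (PySem.List.len al) 1).foldl
      (fun acc i => acc.bind fun sp => (pvEncryptA t al i).map fun st =>
        st.foldl (fun sp2 ch => if ch = ' ' then PySem.List.pySetD sp2 i (PySem.List.pyGetD sp2 i 0 + 1) else sp2) sp)
      (some (List.replicate al.length (0 : Int)))
      = some (pvSpacesB al cntB) := by
    rw [pvFoldBind (PySem.List.pyRange 1 (PySem.List.len al) 1) (fun i => pvEncryptA t al i) []
      (fun sp i st => st.foldl (fun sp2 ch => if ch = ' '
        then PySem.List.pySetD sp2 i (PySem.List.pyGetD sp2 i 0 + 1) else sp2) sp)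
      (List.replicate al.length (0 : Int))
      (fun i _ => by show (pvEncryptA t al i).isSome; rw [hEnc i]; rfl)]
    congr 1
    have hcongr := PySem.List.foldl_congr_mem
      (l := PySem.List.pyRange 1 (PySem.List.len al) 1)
      (f := fun s i => List.foldl (fun sp2 ch => if ch = ' '
        then PySem.List.pySetD sp2 i (PySem.List.pyGetD sp2 i 0 + 1) else sp2) s
        ((pvEncryptA t al i).getD []))
      (g := fun sp i => PySem.List.pySetD sp i (PySem.List.pyGetD sp i 0 + pvCountI al t i))
      (init := List.replicate al.length (0 : Int))
      (by
        intro sp i hi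
        have hi1 : 1 ≤ i ∧ i < (al.length : Int) := by
          simpa [PySem.List.mem_pyRange_one, PySem.List.len_eq] using hi
        show List.foldl _ sp ((pvEncryptA t al i).getD []) = _
        rw [hEnc i]
        simp only [Option.getD_some]
        rw [pvInnerFold i (by omega), hcnt i])
    rw [hcongr]
    have hrep : PySem.List.len al = (((List.replicate al.length (0 : Int)).length : Nat) : Int) := by
      simp [PySem.List.len_eq]
    rw [hrep]
    obtain ⟨hL, hG⟩ := pvSetFold (pvCountI al t)
      (((((List.replicate al.length (0 : Int)).length : Nat) : Int) - 1).toNat) 1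
      (List.replicate al.length (0 : Int)) (by omega) rfl
    apply List.ext_getElem
    · rw [hL]
      simp [pvSpacesB, PySem.List.length_pyRange_one, PySem.List.len_eq]
      omega
    · intro k hk1 hk2
      have hkn : k < al.length := by
        rw [hL] at hk1; simpa using hk1
      have hGk := hG k (by simpa using hkn)
      rw [← List.getD_eq_getElem _ 0 hk1, hGk]
      unfold pvSpacesB
      rcases Nat.eq_zero_or_pos k with hk0 | hkpos
      · subst hk0
        rw [if_neg (by omega)]
        simp
      · rw [if_pos (by exact_mod_cast hkpos)]
        have hgetrep : (List.replicate al.length (0 : Int)).getD k 0 = 0 := by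
          simp [List.getD_eq_getElem?_getD, List.getElem?_replicate, hkn]
        rw [hgetrep]
        have hk1' : k - 1 < (PySem.List.pyRange 1 (PySem.List.len al) 1).length := by
          rw [PySem.List.length_pyRange_one, PySem.List.len_eq]; omega
        rw [List.getElem_cons]
        split
        · omega
        · rw [List.getElem_map]
          rw [PySem.List.getElem_pyRange_one]
          have hcast : (1 : Int) + ((k - 1 : Nat) : Int) = (k : Int) := by
            push_cast; omega
          rw [hcast, hswap (k : Int)]
          ring
  rw [hA, pvCnt_eq t al hok, ← hcntB]
  dsimp only
  cases hmax : PySem.List.max? (pvSpacesB al cntB) (fun x => x) with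
  | none => rfl
  | some m =>
    dsimp only
    cases hidx : PySem.List.index? (pvSpacesB al cntB) m with
    | none => rfl
    | some b =>
      dsimp only
      have hfin : pvEncryptA t al (b : Int)
          = t.foldl (fun acc c => acc.bind fun s =>
              (pvEncCharB al (pvPos al) (b : Int) c).map (s ++ ·)) (some []) := by
        rw [hEnc b]
        rw [pvFoldBind t (fun c => pvEncCharB al (pvPos al) (b : Int) c) []
          (fun s _ y => s ++ y) []
          (fun c hc => by
            show (pvEncCharB al (pvPos al) (b : Int) c).isSome = true
            rw [← pvEncChar_eq al (b : Int) c (hok c hc)]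
            exact pvEncCharA_isSome al (b : Int) c (hok c hc))]
        rw [PySem.List.foldl_append_eq_flatMap]
        simp only [List.nil_append, Option.some.injEq]
        rw [List.flatMap_def, List.flatMap_def]
        exact congrArg List.flatten
          (List.map_congr_left (fun c hc => by rw [pvEncChar_eq al (b : Int) c (hok c hc)]))
      rw [hfin]
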